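-- pv_equiv track=rewrite | github.com/davewil/pygent | src/pygent/core/parallel.py | paths_conflict
-- ===== SOURCE A (Python) =====
-- def paths_conflict(paths1: set[str], paths2: set[str]) -> bool:
--     """Check if two sets of paths conflict (overlap or have parent-child relationship).
--
--     Args:
--         paths1: First set of paths.
--         paths2: Second set of paths.
--
--     Returns:
--         True if paths conflict, False otherwise.
--     """
--     if not paths1 or not paths2:
--         return False
--
--     # Direct overlap
--     if paths1 & paths2:
--         return True
--
--     # Check for parent-child relationships
--     for p1 in paths1:
--         for p2 in paths2:
--             # Normalize paths by stripping trailing slashes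
--             p1_norm = p1.rstrip("/")
--             p2_norm = p2.rstrip("/")
--
--             # Check if one is a prefix of the other (parent-child relationship)
--             if p1_norm.startswith(p2_norm + "/") or p2_norm.startswith(p1_norm + "/"):
--                 return True
--
--     return False
-- ===== SOURCE B (Python) =====
-- def paths_conflict(paths1: set[str], paths2: set[str]) -> bool:
--     # Direct overlap
--     if not paths1.isdisjoint(paths2):
--         return True
--
--     # Normalize once into hash sets, then look each path's ancestor
--     # prefixes (the cuts at '/' positions) up in the other set.
--     norm1 = {p.rstrip("/") for p in paths1}
--     norm2 = {p.rstrip("/") for p in paths2}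
--
--     def has_ancestor_in(norms, others):
--         for q in norms:
--             for i, ch in enumerate(q):
--                 if ch == "/" and q[:i] in others:
--                     return True
--         return False
--
--     return has_ancestor_in(norm1, norm2) or has_ancestor_in(norm2, norm1)
-- ===== Notes on version B (the rewrite author's own statement) =====
-- stated objective: alternative
-- what changed: Replaces the all-pairs prefix test with hash sets of normalized paths: each path's ancestor prefixes (cuts at '/' positions) are looked up in the other side's set, so no path pair is ever compared (intended as faster; measured 1.39x at the largest size, below the 1.5x bar).
import Mathlib
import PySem

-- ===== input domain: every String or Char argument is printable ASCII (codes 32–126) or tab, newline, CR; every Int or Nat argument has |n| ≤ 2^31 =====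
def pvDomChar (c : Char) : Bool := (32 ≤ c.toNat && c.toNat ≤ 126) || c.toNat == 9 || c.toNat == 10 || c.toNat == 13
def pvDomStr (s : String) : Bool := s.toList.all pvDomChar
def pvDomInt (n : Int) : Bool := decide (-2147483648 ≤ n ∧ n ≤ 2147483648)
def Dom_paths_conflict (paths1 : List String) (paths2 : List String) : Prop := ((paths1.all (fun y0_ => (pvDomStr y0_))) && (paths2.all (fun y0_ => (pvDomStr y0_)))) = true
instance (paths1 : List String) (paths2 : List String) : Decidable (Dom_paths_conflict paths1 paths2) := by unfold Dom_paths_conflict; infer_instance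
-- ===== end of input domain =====

-- B replaces A's all-pairs prefix scan by set lookups of each path's ancestor
-- prefixes (the cuts at '/' positions), so no pair of paths is ever compared.

-- ===== PORT A =====
-- exact port of s.rstrip("/"): drop the trailing '/' characters (shared primitive of both ports)
def rstripSlash (cs : List Char) : List Char := cs.rdropWhile (· == '/')

def paths_conflict (paths1 : List String) (paths2 : List String) : Bool :=
  if paths1.isEmpty || paths2.isEmpty then false
  else if (PySem.Set.inter (PySem.Set.ofList paths1) paths2).isEmpty = false then true
  else
    paths1.any (fun p1 => paths2.any (fun p2 =>
      let p1n := rstripSlash p1.toList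
      let p2n := rstripSlash p2.toList
      PySem.Chars.startswith p1n (p2n ++ ['/']) || PySem.Chars.startswith p2n (p1n ++ ['/'])))

-- ===== PORT B =====
def normSet (ps : List String) : PySem.Set (List Char) :=
  PySem.Set.ofList (ps.map (fun p => rstripSlash p.toList))

def hasAncestorIn (norms others : List (List Char)) : Bool :=
  norms.any (fun q =>
    (PySem.List.enumerate q).any (fun ic =>
      ic.2 == '/' && others.contains (PySem.List.slice q none (some ic.1))))

def paths_conflict_alt (paths1 : List String) (paths2 : List String) : Bool :=
  if PySem.Set.isdisjoint (PySem.Set.ofList paths1) paths2 = false then true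
  else
    let norm1 := normSet paths1
    let norm2 := normSet paths2
    hasAncestorIn norm1 norm2 || hasAncestorIn norm2 norm1

-- ===== PRECONDITION & SPEC =====
def Spec_paths_conflict (paths1 : List String) (paths2 : List String) (out : Bool) : Prop := out = paths_conflict_alt paths1 paths2
instance (paths1 : List String) (paths2 : List String) (out : Bool) : Decidable (Spec_paths_conflict paths1 paths2 out) := by unfold Spec_paths_conflict; infer_instance

-- ===== CLAIM (what is proved, stated in full; the proofs are below) =====
def Claim_equal_paths_conflict : Prop := ∀ (paths1 : List String) (paths2 : List String), Dom_paths_conflict paths1 paths2 → Spec_paths_conflict paths1 paths2 (paths_conflict paths1 paths2)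

-- ===== LEMMAS AND PROOFS =====

-- as ++ ['/'] is a prefix of cs  iff  as is the cut of cs just before some '/'
theorem startswith_slash_iff (cs as : List Char) :
    PySem.Chars.startswith cs (as ++ ['/']) = true ↔
      ∃ i : Nat, cs[i]? = some '/' ∧ cs.take i = as := by
  rw [PySem.Chars.startswith_iff]
  constructor
  · rintro ⟨t, ht⟩
    refine ⟨as.length, ?_, ?_⟩
    · rw [← ht]; simp
    · rw [← ht]; simp
  · rintro ⟨i, hget, htake⟩
    have h : as ++ ['/'] = cs.take (i + 1) := by
      rw [List.take_add_one, htake, hget]; rfl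
    rw [h]; exact List.take_prefix _ _

theorem hasAncestorIn_iff (ns os : List (List Char)) :
    hasAncestorIn ns os = true ↔
      ∃ q ∈ ns, ∃ i : Nat, q[i]? = some '/' ∧ q.take i ∈ os := by
  unfold hasAncestorIn
  simp only [List.any_eq_true, PySem.List.mem_enumerate_iff, Bool.and_eq_true, beq_iff_eq,
    List.contains_iff_mem]
  constructor
  · rintro ⟨q, hq, ic, ⟨k, hk, rfl⟩, hsl, hmem⟩
    dsimp only at hsl hmem
    rw [zero_add, PySem.List.slice_to q (Int.natCast_nonneg k), Int.toNat_natCast] at hmem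
    exact ⟨q, hq, k, by simp [List.getElem?_eq_getElem hk, hsl], hmem⟩
  · rintro ⟨q, hq, i, hget, hmem⟩
    have hi : i < q.length := by
      by_contra h
      rw [List.getElem?_eq_none (by omega)] at hget
      simp at hget
    refine ⟨q, hq, ((0 : Int) + (i : Int), q[i]), ⟨i, hi, rfl⟩, ?_, ?_⟩
    · rw [List.getElem?_eq_getElem hi] at hget
      simpa using hget
    · dsimp only
      rw [zero_add, PySem.List.slice_to q (Int.natCast_nonneg i), Int.toNat_natCast]
      exact hmem

-- membership in the normalized set
theorem mem_normSet_iff (ps : List String) (q : List Char) :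
    q ∈ normSet ps ↔ ∃ p ∈ ps, q = rstripSlash p.toList := by
  unfold normSet
  simp [PySem.Set.mem_ofList, List.mem_map, eq_comm]

-- A's nested pair scan agrees with B's two ancestor-set lookups
theorem pair_scan_eq_anc (paths1 paths2 : List String) :
    (paths1.any (fun p1 => paths2.any (fun p2 =>
        let p1n := rstripSlash p1.toList
        let p2n := rstripSlash p2.toList
        PySem.Chars.startswith p1n (p2n ++ ['/']) || PySem.Chars.startswith p2n (p1n ++ ['/']))))
      = (hasAncestorIn (normSet paths1) (normSet paths2)
          || hasAncestorIn (normSet paths2) (normSet paths1)) := by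
  rw [Bool.eq_iff_iff]
  simp only [List.any_eq_true, Bool.or_eq_true, hasAncestorIn_iff, mem_normSet_iff,
    startswith_slash_iff]
  constructor
  · rintro ⟨p1, h1, p2, h2, h | h⟩
    · rcases h with ⟨i, hg, ht⟩
      exact Or.inl ⟨_, ⟨p1, h1, rfl⟩, i, hg, ht ▸ ⟨p2, h2, rfl⟩⟩
    · rcases h with ⟨i, hg, ht⟩
      exact Or.inr ⟨_, ⟨p2, h2, rfl⟩, i, hg, ht ▸ ⟨p1, h1, rfl⟩⟩
  · rintro (⟨q, ⟨p1, h1, rfl⟩, i, hg, p2, h2, ht⟩ | ⟨q, ⟨p2, h2, rfl⟩, i, hg, p1, h1, ht⟩)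
    · exact ⟨p1, h1, p2, h2, Or.inl ⟨i, hg, ht.symm ▸ rfl⟩⟩
    · exact ⟨p1, h1, p2, h2, Or.inr ⟨i, hg, ht.symm ▸ rfl⟩⟩

-- ===== VERDICT (by name: the statement is the Claim_ definition above) =====
theorem paths_conflict_spec : Claim_equal_paths_conflict := by
  intro paths1 paths2 _
  unfold Spec_paths_conflict paths_conflict paths_conflict_alt
  have hd : (PySem.Set.isdisjoint (PySem.Set.ofList paths1) paths2 = false)
      ↔ ((PySem.Set.inter (PySem.Set.ofList paths1) paths2).isEmpty = false) := by
    rw [← Bool.not_eq_true, ← Bool.not_eq_true, not_iff_not, PySem.Set.isdisjoint_iff,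
      List.isEmpty_iff, List.eq_nil_iff_forall_not_mem]
    simp only [PySem.Set.mem_inter, PySem.Set.mem_ofList]
    tauto
  by_cases h1 : (paths1.isEmpty || paths2.isEmpty) = true
  · rw [if_pos h1]
    symm
    rcases Bool.or_eq_true_iff.mp h1 with h | h <;> rw [List.isEmpty_iff] at h <;> subst h <;>
      simp [hasAncestorIn, normSet, PySem.Set.isdisjoint_iff, PySem.Set.mem_ofList]
  · rw [if_neg h1]
    by_cases h2 : ((PySem.Set.inter (PySem.Set.ofList paths1) paths2).isEmpty = false)
    · rw [if_pos h2, if_pos (hd.mpr h2)]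
    · rw [if_neg h2, if_neg (fun h => h2 (hd.mp h))]
      exact pair_scan_eq_anc paths1 paths2
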